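-- pv_equiv track=rewrite | github.com/mcsf/aoc2023 | 12/run.py | assign
-- ===== SOURCE A (Python) =====
-- def assign(springs, slot_assignments):
--     result = []
--     for i in range(len(springs)):
--         spring = springs[i]
--         if i in slot_assignments:
--             spring = '#'
--         elif springs[i] == '?':
--             spring = '.'
--         result.append(spring)
--     return result
-- ===== SOURCE B (Python) =====
-- def assign(springs, slot_assignments):
--     result = ['.' if s == '?' else s for s in springs]
--     for j in slot_assignments:
--         if 0 <= j < len(springs):
--             result[j] = '#'
--     return result
-- ===== Notes on version B (the rewrite author's own statement) =====
-- stated objective: alternative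
-- what changed: B first maps the whole springs list ('?' -> '.', others unchanged) and then iterates over slot_assignments writing '#' at each in-range index, instead of A's single pass testing membership of every index in slot_assignments.
import Mathlib
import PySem

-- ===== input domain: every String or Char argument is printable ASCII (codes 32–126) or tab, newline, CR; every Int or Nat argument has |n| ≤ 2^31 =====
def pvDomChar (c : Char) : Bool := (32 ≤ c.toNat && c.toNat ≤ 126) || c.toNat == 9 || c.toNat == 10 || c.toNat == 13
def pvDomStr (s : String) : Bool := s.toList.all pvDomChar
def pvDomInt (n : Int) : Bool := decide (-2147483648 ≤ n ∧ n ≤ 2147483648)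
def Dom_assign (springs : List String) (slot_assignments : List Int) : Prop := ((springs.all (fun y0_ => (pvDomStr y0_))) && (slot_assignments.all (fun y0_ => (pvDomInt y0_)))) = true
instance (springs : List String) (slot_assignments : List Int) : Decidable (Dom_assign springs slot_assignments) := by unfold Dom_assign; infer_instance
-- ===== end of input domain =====

-- B maps the whole list ('?' -> '.') first and then writes '#' at each in-range assigned
-- index, instead of A's per-element membership test; objective: alternative decomposition.

-- ===== PORT A =====
-- one pass over the indices, testing membership of each index in slot_assignments
def assign (springs : List String) (slot_assignments : List Int) : List String :=
  (List.range springs.length).foldl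
    (fun result i =>
      let spring := springs.getD i ""          -- i < springs.length, so this is springs[i]
      let spring := if ((i : Int) ∈ slot_assignments) then "#"
        else if springs.getD i "" = "?" then "." else spring
      result ++ [spring]) []

-- ===== PORT B =====
def assign_alt (springs : List String) (slot_assignments : List Int) : List String :=
  let result := springs.map (fun s => if s = "?" then "." else s)
  slot_assignments.foldl
    (fun res j => if 0 ≤ j ∧ j < (springs.length : Int) then res.set j.toNat "#" else res)
    result

-- ===== PRECONDITION & SPEC =====
def Spec_assign (springs : List String) (slot_assignments : List Int) (out : List String) : Prop := out = assign_alt springs slot_assignments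
instance (springs : List String) (slot_assignments : List Int) (out : List String) : Decidable (Spec_assign springs slot_assignments out) := by unfold Spec_assign; infer_instance

-- ===== CLAIM (what is proved, stated in full; the proofs are below) =====
def Claim_equal_assign : Prop := ∀ (springs : List String) (slot_assignments : List Int), Dom_assign springs slot_assignments → Spec_assign springs slot_assignments (assign springs slot_assignments)

-- ===== LEMMAS AND PROOFS =====

-- the append-fold of A is a map over the index range
theorem foldl_append_map {α β : Type} (f : α → β) (l : List α) (acc : List β) :
    l.foldl (fun r i => r ++ [f i]) acc = acc ++ l.map f := by
  induction l generalizing acc with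
  | nil => simp
  | cons x xs ih => simp [ih]

-- elementwise characterisation of the set-fold of B
theorem foldl_set_getElem? (n : ℕ) (sa : List Int) (res : List String)
    (h : res.length = n) (k : ℕ) :
    (sa.foldl (fun r j => if 0 ≤ j ∧ j < (n : Int) then r.set j.toNat "#" else r) res)[k]?
      = if ((k : Int) ∈ sa ∧ k < n) then some "#" else res[k]? := by
  induction sa generalizing res with
  | nil => simp
  | cons j rest ih =>
    simp only [List.foldl_cons]
    by_cases hg : 0 ≤ j ∧ j < (n : Int)
    · rw [if_pos hg, ih _ (by simp [h])]
      by_cases hm : (k : Int) ∈ rest ∧ k < n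
      · rw [if_pos hm, if_pos ⟨List.mem_cons_of_mem _ hm.1, hm.2⟩]
      · rw [if_neg hm]
        by_cases hj : (k : Int) = j ∧ k < n
        · have hjk : j.toNat = k := by omega
          rw [if_pos ⟨by simp [hj.1], hj.2⟩, hjk, List.getElem?_set_self (by omega)]
        · have hne : j.toNat ≠ k := by omega
          rw [List.getElem?_set_ne hne, if_neg]
          intro ⟨hmem, hk⟩
          rcases List.mem_cons.mp hmem with h1 | h1
          · exact hj ⟨h1, hk⟩
          · exact hm ⟨h1, hk⟩
    · rw [if_neg hg, ih _ h]
      have : ((k : Int) ∈ j :: rest ∧ k < n) ↔ ((k : Int) ∈ rest ∧ k < n) := by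
        constructor
        · intro ⟨hmem, hk⟩
          rcases List.mem_cons.mp hmem with h1 | h1
          · exact absurd ⟨by omega, by omega⟩ hg
          · exact ⟨h1, hk⟩
        · exact fun ⟨hmem, hk⟩ => ⟨List.mem_cons_of_mem _ hmem, hk⟩
      simp only [this]

theorem assign_eq_alt (springs : List String) (sa : List Int) :
    assign springs sa = assign_alt springs sa := by
  unfold assign assign_alt
  rw [foldl_append_map, List.nil_append]
  apply List.ext_getElem?
  intro k
  rw [foldl_set_getElem? springs.length sa _ (by simp) k]
  by_cases hk : k < springs.length
  · simp only [List.getElem?_map, List.getElem?_range hk, Option.map_some,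
      List.getElem?_eq_getElem hk]
    by_cases hm : (k : Int) ∈ sa
    · simp [hm, hk]
    · simp [hm, hk, List.getD_eq_getElem?_getD]
  · simp [hk]

-- ===== VERDICT (by name: the statement is the Claim_ definition above) =====
theorem assign_spec : Claim_equal_assign := by
  intro springs sa _
  exact assign_eq_alt springs sa
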